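-- pv_equiv track=rewrite | github.com/wangjingshen/script | probe_primer/script/probe.py | get_seq_str
-- ===== SOURCE A (Python) =====
-- def get_seq_str(seq, sub_pattern_dict):
--     """
--     Get subseq with intervals in arr and concatenate
--
--     Args:
--         seq: str
--         sub_pattern_dict: [[0, 8], [24, 32], [48, 56]]
--
--     Returns:
--         str
--
--     Raise:
--         IndexError: if sequence length is not enough
--
--     >>> sub_pattern_dict = [[0, 8]]
--     >>> seq = "A" * 7
--     >>> Barcode.get_seq_str(seq, sub_pattern_dict)
--     Traceback (most recent call last):
--     ...
--     IndexError: sequence length is not enough in R1 read: AAAAAAA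
--     >>> seq = "A" * 8
--     >>> Barcode.get_seq_str(seq, sub_pattern_dict)
--     'AAAAAAAA'
--     """
--     seq_len = len(seq)
--     ans = []
--     for item in sub_pattern_dict:
--         start, end = item[0], item[1]
--         if end > seq_len:
--             raise IndexError(f"sequence length is not enough in R1 read: {seq}")
--         else:
--             ans.append(seq[start:end])
--     return ''.join(ans)
-- ===== SOURCE B (Python) =====
-- def get_seq_str(seq, sub_pattern_dict):
--     """Recursive decomposition: head slice + recursion on the tail (no accumulator list, no join)."""
--     if not sub_pattern_dict:
--         return ''
--     head = sub_pattern_dict[0]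
--     if head[1] > len(seq):
--         raise IndexError(f"sequence length is not enough in R1 read: {seq}")
--     return seq[head[0]:head[1]] + get_seq_str(seq, sub_pattern_dict[1:])
-- ===== Notes on version B (the rewrite author's own statement) =====
-- stated objective: alternative
-- what changed: A iterates with an accumulator list and a final ''.join; B is recursive on the interval list, concatenating the head slice onto the recursive result for the tail, with no accumulator and no join.
import Mathlib
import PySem

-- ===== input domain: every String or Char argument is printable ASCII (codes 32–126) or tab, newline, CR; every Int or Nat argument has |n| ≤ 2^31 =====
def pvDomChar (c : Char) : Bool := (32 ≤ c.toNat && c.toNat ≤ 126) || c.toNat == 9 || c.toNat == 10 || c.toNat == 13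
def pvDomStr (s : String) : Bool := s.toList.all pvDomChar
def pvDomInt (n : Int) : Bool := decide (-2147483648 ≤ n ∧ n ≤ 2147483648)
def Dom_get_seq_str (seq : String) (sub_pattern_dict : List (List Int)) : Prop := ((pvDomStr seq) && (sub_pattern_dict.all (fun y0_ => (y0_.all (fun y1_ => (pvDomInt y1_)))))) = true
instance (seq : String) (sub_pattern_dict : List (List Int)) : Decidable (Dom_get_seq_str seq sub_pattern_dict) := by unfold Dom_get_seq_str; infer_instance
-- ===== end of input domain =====

-- B replaces A's accumulator-list-plus-join loop by structural recursion on the interval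
-- list, concatenating each head slice onto the recursive result (objective: alternative
-- decomposition, same asymptotic cost for the slicing work).

-- ===== PORT A =====
-- single loop: check each end against len(seq), append the slice to ans, join at the end
def get_seq_str (seq : String) (sub_pattern_dict : List (List Int)) : String :=
  let seq_len : Int := PySem.Str.len seq
  let ans : List String := sub_pattern_dict.foldl (fun acc item =>
    let start := (PySem.List.pyGet? item 0).getD 0
    let ed := (PySem.List.pyGet? item 1).getD 0
    if ed > seq_len then acc   -- Python raises IndexError here; excluded by Pre_
    else acc ++ [PySem.Str.slice seq (some start) (some ed)]) []
  PySem.Str.join "" ans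

-- ===== PORT B =====
-- recursion on the interval list: empty → '', else head slice ++ recurse on the tail
def get_seq_str_alt (seq : String) (sub_pattern_dict : List (List Int)) : String :=
  match sub_pattern_dict with
  | [] => ""
  | head :: rest =>
    if (PySem.List.pyGet? head 1).getD 0 > PySem.Str.len seq then ""   -- Python raises IndexError here; excluded by Pre_
    else PySem.Str.slice seq (some ((PySem.List.pyGet? head 0).getD 0))
           (some ((PySem.List.pyGet? head 1).getD 0))
         ++ get_seq_str_alt seq rest

-- ===== PRECONDITION & SPEC =====
-- Pre_: exactly where A returns: every interval has at least two entries (else item[0]/item[1]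
-- raises IndexError) and every end item[1] is at most len(seq) (else A's explicit raise fires).
def Pre_get_seq_str (seq : String) (sub_pattern_dict : List (List Int)) : Prop :=
  ∀ item ∈ sub_pattern_dict, 2 ≤ item.length ∧ (PySem.List.pyGet? item 1).getD 0 ≤ PySem.Str.len seq
instance (seq : String) (sub_pattern_dict : List (List Int)) : Decidable (Pre_get_seq_str seq sub_pattern_dict) := by unfold Pre_get_seq_str; infer_instance
def pvWitness_get_seq_str : String × List (List Int) := ("ACGTACGT", [[0, 2], [4, 6]])

def Spec_get_seq_str (seq : String) (sub_pattern_dict : List (List Int)) (out : String) : Prop := out = get_seq_str_alt seq sub_pattern_dict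
instance (seq : String) (sub_pattern_dict : List (List Int)) (out : String) : Decidable (Spec_get_seq_str seq sub_pattern_dict out) := by unfold Spec_get_seq_str; infer_instance

-- ===== CLAIM =====
def Claim_equal_get_seq_str : Prop := ∀ (seq : String) (sub_pattern_dict : List (List Int)), Dom_get_seq_str seq sub_pattern_dict → Pre_get_seq_str seq sub_pattern_dict → Spec_get_seq_str seq sub_pattern_dict (get_seq_str seq sub_pattern_dict)

-- ===== LEMMAS AND PROOFS =====

-- ''.join on a cons is head concatenation
theorem pv_join_empty_cons (x : String) (t : List String) :
    PySem.Str.join "" (x :: t) = x ++ PySem.Str.join "" t := by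
  have h : ∀ (a : List Char) (b : List (List Char)), PySem.Chars.join [] (a :: b) = a ++ PySem.Chars.join [] b := by
    intro a b; cases b <;> simp [PySem.Chars.join_cons_cons, PySem.Chars.join_nil]
  apply String.toList_injective
  simp [PySem.Str.join, h]

-- A's loop, when the raise branch never fires, builds exactly the mapped slice list.
theorem pv_foldl_eq_map (seq : String) (seq_len : Int) (l : List (List Int))
    (h : ∀ item ∈ l, (PySem.List.pyGet? item 1).getD 0 ≤ seq_len) (acc : List String) :
    l.foldl (fun acc item =>
      let start := (PySem.List.pyGet? item 0).getD 0
      let ed := (PySem.List.pyGet? item 1).getD 0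
      if ed > seq_len then acc
      else acc ++ [PySem.Str.slice seq (some start) (some ed)]) acc
    = acc ++ l.map (fun item =>
        PySem.Str.slice seq (some ((PySem.List.pyGet? item 0).getD 0)) (some ((PySem.List.pyGet? item 1).getD 0))) := by
  induction l generalizing acc with
  | nil => simp
  | cons x t ih =>
    have hx := h x (by simp)
    have hnot : ¬ ((PySem.List.pyGet? x 1).getD 0 > seq_len) := by omega
    simp only [List.foldl_cons, List.map_cons]
    rw [if_neg hnot, ih (fun i hi => h i (by simp [hi]))]
    simp

-- ''.join of the slice list equals B's recursion whenever no end exceeds len(seq)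
theorem pv_join_eq_rec (seq : String) (l : List (List Int))
    (h : ∀ item ∈ l, (PySem.List.pyGet? item 1).getD 0 ≤ PySem.Str.len seq) :
    PySem.Str.join "" (l.map (fun item =>
      PySem.Str.slice seq (some ((PySem.List.pyGet? item 0).getD 0)) (some ((PySem.List.pyGet? item 1).getD 0))))
    = get_seq_str_alt seq l := by
  induction l with
  | nil => simp [get_seq_str_alt, PySem.Str.join, PySem.Chars.join_nil]
  | cons x t ih =>
    have hx := h x (by simp)
    simp only [List.map_cons, pv_join_empty_cons, get_seq_str_alt]
    rw [if_neg (by omega), ih (fun i hi => h i (by simp [hi]))]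

-- ===== VERDICT =====
theorem get_seq_str_spec : Claim_equal_get_seq_str := by
  intro seq spd _ hpre
  unfold Spec_get_seq_str get_seq_str
  have hends : ∀ item ∈ spd, (PySem.List.pyGet? item 1).getD 0 ≤ PySem.Str.len seq :=
    fun i hi => (hpre i hi).2
  simp only []
  rw [pv_foldl_eq_map seq _ spd hends [], List.nil_append, pv_join_eq_rec seq spd hends]
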